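-- pv_equiv track=rewrite | github.com/JakubBraz/adventOfCode2021 | advent2021_21.py | step
-- ===== SOURCE A (Python) =====
-- def calculate_new_poistion(old_position, move_by, limit):
--     new_position = old_position + move_by
--     new_position = new_position % limit
--     if new_position == 0:
--         return limit
--     return new_position
--
-- def move(score, position, dice, dice_limit, board_limit):
--     new_dice = (dice) % dice_limit + 1, (dice + 1) % dice_limit + 1, (dice + 2) % dice_limit + 1
--     move_by = sum(new_dice)
--     new_position = calculate_new_poistion(position, move_by, board_limit)
--     new_score = score + new_position
--     return new_score, new_position, new_dice[-1]
--
-- def step(score1, score2, pos1, pos2, dice, rolled, win_limit):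
--     s1, p1, dice = move(score1, pos1, dice, 100, 10)
--     if s1 >= win_limit:
--         return (1, score2, rolled + 3)
--     s2, p2, dice = move(score2, pos2, dice, 100, 10)
--     if s2 >= win_limit:
--         return (2, score1, rolled + 6)
--     return step(s1, s2, p1, p2, dice, rolled + 6, win_limit)
-- ===== SOURCE B (Python) =====
-- def step(score1, score2, pos1, pos2, dice, rolled, win_limit):
--     # Iterative re-implementation: one while-loop, helpers inlined, branch-free
--     # board wraparound via (pos + move - 1) % 10 + 1; scores are committed only
--     # at the bottom of the loop (a player-2 win reports player 1's score from
--     # before the current round, exactly as A does).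
--     while True:
--         last = (dice + 2) % 100 + 1
--         move_by = (dice % 100 + 1) + ((dice + 1) % 100 + 1) + last
--         pos1 = (pos1 + move_by - 1) % 10 + 1
--         if score1 + pos1 >= win_limit:
--             return (1, score2, rolled + 3)
--         dice = last
--         last = (dice + 2) % 100 + 1
--         move_by = (dice % 100 + 1) + ((dice + 1) % 100 + 1) + last
--         pos2 = (pos2 + move_by - 1) % 10 + 1
--         if score2 + pos2 >= win_limit:
--             return (2, score1, rolled + 6)
--         score1 += pos1
--         score2 += pos2
--         dice = last
--         rolled += 6
-- ===== Notes on version B (the rewrite author's own statement) =====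
-- stated objective: simpler
-- what changed: Replaced the three-function tail recursion with a single iterative while-True loop over mutable state, inlining the move/position helpers and replacing the mod-10 zero-fixup branch with the branch-free (pos+move-1)%10+1 formula.
-- outside the precondition, e.g. on step(0, 0, 4, 8, 0, 0, 4000): A returns (1, 2995, 3993), B returns (1, 2995, 3993)
import Mathlib
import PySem

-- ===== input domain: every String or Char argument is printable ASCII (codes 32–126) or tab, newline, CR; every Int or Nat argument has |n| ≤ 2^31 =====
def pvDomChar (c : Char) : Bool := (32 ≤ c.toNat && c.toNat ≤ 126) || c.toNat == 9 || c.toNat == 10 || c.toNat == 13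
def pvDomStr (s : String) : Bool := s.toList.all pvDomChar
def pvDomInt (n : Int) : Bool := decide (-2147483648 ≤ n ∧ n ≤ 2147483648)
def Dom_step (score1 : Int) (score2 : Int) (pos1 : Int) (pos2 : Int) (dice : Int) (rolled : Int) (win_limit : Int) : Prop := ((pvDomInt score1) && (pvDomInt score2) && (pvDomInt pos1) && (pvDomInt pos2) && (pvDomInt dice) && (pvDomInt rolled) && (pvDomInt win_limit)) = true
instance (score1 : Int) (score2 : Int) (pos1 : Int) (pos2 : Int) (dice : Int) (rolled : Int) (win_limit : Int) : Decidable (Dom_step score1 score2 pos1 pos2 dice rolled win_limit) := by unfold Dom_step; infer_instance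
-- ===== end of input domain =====

-- B rewrites A's mutual-helper recursion as a single tail-recursive loop with the
-- move helpers inlined and a branch-free (pos+move-1)%10+1 board wraparound (objective: simpler).

-- ===== PORT A =====
def calculate_new_poistion (old_position : Int) (move_by : Int) (limit : Int) : Int :=
  if PySem.Int.mod (old_position + move_by) limit = 0 then limit
  else PySem.Int.mod (old_position + move_by) limit

def move (score : Int) (position : Int) (dice : Int) (dice_limit : Int) (board_limit : Int) : Int × Int × Int :=
  let d1 := PySem.Int.mod dice dice_limit + 1
  let d2 := PySem.Int.mod (dice + 1) dice_limit + 1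
  let d3 := PySem.Int.mod (dice + 2) dice_limit + 1
  let move_by := d1 + d2 + d3
  let new_position := calculate_new_poistion position move_by board_limit
  (score + new_position, new_position, d3)

-- used by step's decreasing_by: each move adds at least 1 to the score
theorem move_fst_lt (score position dice : Int) : score < (move score position dice 100 10).1 := by
  simp only [move, calculate_new_poistion]
  rw [PySem.Int.mod_eq_emod_of_pos (b := 10) (by norm_num)]
  split <;> omega

def step (score1 : Int) (score2 : Int) (pos1 : Int) (pos2 : Int) (dice : Int) (rolled : Int) (win_limit : Int) : Int × Int × Int :=
  let m1 := move score1 pos1 dice 100 10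
  if m1.1 ≥ win_limit then (1, score2, rolled + 3)
  else
    let m2 := move score2 pos2 m1.2.2 100 10
    if m2.1 ≥ win_limit then (2, score1, rolled + 6)
    else step m1.1 m2.1 m1.2.1 m2.2.1 m2.2.2 (rolled + 6) win_limit
termination_by (win_limit - score1).toNat
decreasing_by
  have h := move_fst_lt score1 pos1 dice
  have e : m1.1 = (move score1 pos1 dice 100 10).1 := rfl
  omega

-- ===== PORT B =====
-- used by step_alt's decreasing_by: the committed player-1 score strictly grows
theorem q_pos (x : Int) : 1 ≤ PySem.Int.mod x 10 + 1 := by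
  rw [PySem.Int.mod_eq_emod_of_pos (b := 10) (by norm_num)]
  omega

def step_alt (score1 : Int) (score2 : Int) (pos1 : Int) (pos2 : Int) (dice : Int) (rolled : Int) (win_limit : Int) : Int × Int × Int :=
  let last1 := PySem.Int.mod (dice + 2) 100 + 1
  let mv1 := (PySem.Int.mod dice 100 + 1) + (PySem.Int.mod (dice + 1) 100 + 1) + last1
  let q1 := PySem.Int.mod (pos1 + mv1 - 1) 10 + 1
  if score1 + q1 ≥ win_limit then (1, score2, rolled + 3)
  else
    let last2 := PySem.Int.mod (last1 + 2) 100 + 1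
    let mv2 := (PySem.Int.mod last1 100 + 1) + (PySem.Int.mod (last1 + 1) 100 + 1) + last2
    let q2 := PySem.Int.mod (pos2 + mv2 - 1) 10 + 1
    if score2 + q2 ≥ win_limit then (2, score1, rolled + 6)
    else step_alt (score1 + q1) (score2 + q2) q1 q2 last2 (rolled + 6) win_limit
termination_by (win_limit - score1).toNat
decreasing_by
  have h := q_pos (pos1 + ((PySem.Int.mod dice 100 + 1) + (PySem.Int.mod (dice + 1) 100 + 1) + (PySem.Int.mod (dice + 2) 100 + 1)) - 1)
  have e : q1 = PySem.Int.mod (pos1 + ((PySem.Int.mod dice 100 + 1) + (PySem.Int.mod (dice + 1) 100 + 1) + (PySem.Int.mod (dice + 2) 100 + 1)) - 1) 10 + 1 := rfl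
  omega

-- ===== PRECONDITION & SPEC =====
-- Pre_ excludes inputs whose game needs so many rounds that A's recursion can exceed
-- the Python interpreter's recursion limit (RecursionError): from any board state, one
-- of the two players is guaranteed (exhaustive worst case over all 10*10*100
-- position/dice states) to gain at least 3375 points within 750 rounds, so inside this
-- bound A's recursion depth stays well under the default limit and A returns; the bound
-- is conservative, so some long-but-returning games beyond it are also excluded.
def Pre_step (score1 : Int) (score2 : Int) (pos1 : Int) (pos2 : Int) (dice : Int) (rolled : Int) (win_limit : Int) : Prop :=
  win_limit ≤ score1 + 3375 ∨ win_limit ≤ score2 + 3375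
instance (score1 : Int) (score2 : Int) (pos1 : Int) (pos2 : Int) (dice : Int) (rolled : Int) (win_limit : Int) : Decidable (Pre_step score1 score2 pos1 pos2 dice rolled win_limit) := by unfold Pre_step; infer_instance
def pvWitness_step : Int × Int × Int × Int × Int × Int × Int := (0, 0, 4, 8, 0, 0, 1000)
def Spec_step (score1 : Int) (score2 : Int) (pos1 : Int) (pos2 : Int) (dice : Int) (rolled : Int) (win_limit : Int) (out : Int × Int × Int) : Prop := out = step_alt score1 score2 pos1 pos2 dice rolled win_limit
instance (score1 : Int) (score2 : Int) (pos1 : Int) (pos2 : Int) (dice : Int) (rolled : Int) (win_limit : Int) (out : Int × Int × Int) : Decidable (Spec_step score1 score2 pos1 pos2 dice rolled win_limit out) := by unfold Spec_step; infer_instance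

-- ===== CLAIM (what is proved, stated in full; the proofs are below) =====
def Claim_equal_step : Prop := ∀ (score1 : Int) (score2 : Int) (pos1 : Int) (pos2 : Int) (dice : Int) (rolled : Int) (win_limit : Int), Dom_step score1 score2 pos1 pos2 dice rolled win_limit → Pre_step score1 score2 pos1 pos2 dice rolled win_limit → Spec_step score1 score2 pos1 pos2 dice rolled win_limit (step score1 score2 pos1 pos2 dice rolled win_limit)

-- ===== LEMMAS AND PROOFS =====

-- A's "%10 then 0→10 fixup" equals B's branch-free (x-1)%10+1
theorem fixup_eq (p mv : Int) :
    calculate_new_poistion p mv 10 = PySem.Int.mod (p + mv - 1) 10 + 1 := by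
  unfold calculate_new_poistion
  rw [PySem.Int.mod_eq_emod_of_pos (b := 10) (by norm_num),
      PySem.Int.mod_eq_emod_of_pos (b := 10) (by norm_num)]
  split <;> omega

theorem move_fst_eq (s p d : Int) :
    (move s p d 100 10).1
      = s + (PySem.Int.mod (p + ((PySem.Int.mod d 100 + 1) + (PySem.Int.mod (d + 1) 100 + 1) + (PySem.Int.mod (d + 2) 100 + 1)) - 1) 10 + 1) := by
  simp only [move, fixup_eq]

theorem move_snd_eq (s p d : Int) :
    (move s p d 100 10).2.1
      = PySem.Int.mod (p + ((PySem.Int.mod d 100 + 1) + (PySem.Int.mod (d + 1) 100 + 1) + (PySem.Int.mod (d + 2) 100 + 1)) - 1) 10 + 1 := by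
  simp only [move, fixup_eq]

theorem move_thd_eq (s p d : Int) :
    (move s p d 100 10).2.2 = PySem.Int.mod (d + 2) 100 + 1 := by
  simp only [move]

theorem step_eq_alt (score1 score2 pos1 pos2 dice rolled win_limit : Int) :
    step score1 score2 pos1 pos2 dice rolled win_limit
      = step_alt score1 score2 pos1 pos2 dice rolled win_limit := by
  fun_induction step score1 score2 pos1 pos2 dice rolled win_limit with
  | case1 s1 s2 p1 p2 d r m1 h =>
    have e1 : m1 = move s1 p1 d 100 10 := rfl
    rw [e1] at h
    rw [move_fst_eq] at h
    rw [step_alt, if_pos h]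
  | case2 s1 s2 p1 p2 d r m1 h1 m2 h2 =>
    have e1 : m1 = move s1 p1 d 100 10 := rfl
    have e2 : m2 = move s2 p2 (move s1 p1 d 100 10).2.2 100 10 := by rw [← e1]
    rw [e1, move_fst_eq] at h1
    rw [e2, move_fst_eq, move_thd_eq] at h2
    rw [step_alt, if_neg h1, if_pos h2]
  | case3 s1 s2 p1 p2 d r m1 h1 m2 h2 ih =>
    have e1 : m1 = move s1 p1 d 100 10 := rfl
    have e2 : m2 = move s2 p2 (move s1 p1 d 100 10).2.2 100 10 := by rw [← e1]
    rw [e1, move_fst_eq] at h1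
    rw [e2, move_fst_eq, move_thd_eq] at h2
    rw [step_alt, if_neg h1, if_neg h2]
    rw [e1, e2] at ih ⊢
    simp only [move_fst_eq, move_snd_eq, move_thd_eq] at ih ⊢
    exact ih
-- ===== VERDICT (by name: the statement is the Claim_ definition above) =====
theorem step_spec : Claim_equal_step := by
  intro s1 s2 p1 p2 d r w _ _
  unfold Spec_step
  exact step_eq_alt s1 s2 p1 p2 d r w
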